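-- pv_equiv track=rewrite | github.com/Huoqichen/repomap | repomap/parser.py | _resolve_dotted_internal_import
-- ===== SOURCE A (Python) =====
-- def _resolve_dotted_internal_import(import_name: str, name_to_id: dict[str, str]) -> list[str]:
--     if not import_name:
--         return []
--
--     normalized = import_name.removesuffix(".*")
--     if normalized in name_to_id:
--         return [name_to_id[normalized]]
--
--     if import_name.endswith(".*"):
--         return sorted(
--             module_id for dotted_name, module_id in name_to_id.items() if dotted_name.startswith(f"{normalized}.")
--         )
--
--     parts = normalized.split(".")
--     for index in range(len(parts) - 1, 0, -1):
--         prefix = ".".join(parts[:index])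
--         matches = [module_id for dotted_name, module_id in name_to_id.items() if dotted_name.startswith(f"{prefix}.")]
--         if matches:
--             return sorted(matches)
--     return []
-- ===== SOURCE B (Python) =====
-- def _resolve_dotted_internal_import(import_name: str, name_to_id: dict[str, str]) -> list[str]:
--     if not import_name:
--         return []
--
--     normalized = import_name.removesuffix(".*")
--     if normalized in name_to_id:
--         return [name_to_id[normalized]]
--
--     if import_name.endswith(".*"):
--         return sorted(
--             module_id for dotted_name, module_id in name_to_id.items() if dotted_name.startswith(f"{normalized}.")
--         )
--
--     # Single pass: score every entry with the length of its longest matching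
--     # dotted prefix of `normalized`, then keep the top scorers.
--     parts = normalized.split(".")
--
--     def level(dotted_name: str) -> int:
--         best = 0
--         for i in range(1, len(parts)):
--             if dotted_name.startswith(".".join(parts[:i]) + "."):
--                 best = i
--         return best
--
--     scored = [(module_id, level(dotted_name)) for dotted_name, module_id in name_to_id.items()]
--     best = 0
--     for _, lv in scored:
--         best = max(best, lv)
--     if best >= 1:
--         return sorted(module_id for module_id, lv in scored if lv == best)
--     return []
-- ===== Notes on version B (the rewrite author's own statement) =====
-- stated objective: alternative
-- what changed: The prefix-resolution stage no longer re-scans the whole dict once per candidate prefix length with an early return; instead one scoring pass assigns every entry the length of its longest matching dotted prefix, and the entries achieving the maximum score are returned.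
import Mathlib
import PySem

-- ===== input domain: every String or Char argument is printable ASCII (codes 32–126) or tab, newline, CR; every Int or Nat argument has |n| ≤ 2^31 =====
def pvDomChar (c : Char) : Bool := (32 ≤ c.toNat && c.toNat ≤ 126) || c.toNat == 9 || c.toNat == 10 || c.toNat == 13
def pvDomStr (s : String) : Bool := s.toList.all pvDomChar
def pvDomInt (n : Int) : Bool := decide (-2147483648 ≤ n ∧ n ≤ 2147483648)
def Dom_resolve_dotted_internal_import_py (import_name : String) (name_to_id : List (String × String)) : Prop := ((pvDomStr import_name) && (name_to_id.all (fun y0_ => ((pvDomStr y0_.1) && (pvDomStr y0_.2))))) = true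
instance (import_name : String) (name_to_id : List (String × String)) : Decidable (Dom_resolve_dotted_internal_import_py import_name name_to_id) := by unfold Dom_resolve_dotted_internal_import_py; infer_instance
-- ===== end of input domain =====

-- B replaces A's repeated dict re-scan per prefix length by a single scoring pass
-- (longest matching prefix level per entry, then the top scorers); objective: alternative decomposition, not claimed faster.

-- ===== PORT A =====
-- A's descending for-loop with early return, as structural recursion over range(len(parts)-1, 0, -1)
def pvALoop (items : List (String × String)) (parts : List String) : List Int → List String
  | [] => []
  | i :: rest =>
    let pfx := PySem.Str.join "." (PySem.List.slice parts none (some i))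
    let ms := (items.filter (fun p => PySem.Str.startswith p.1 (pfx ++ "."))).map (fun p => p.2)
    if ms = [] then pvALoop items parts rest
    else PySem.List.sorted ms (fun x => x) false

def resolve_dotted_internal_import_py (import_name : String) (name_to_id : List (String × String)) : List String :=
  let d := PySem.Dict.ofList name_to_id
  if import_name = "" then []
  else
    -- import_name.removesuffix(".*")
    let normalized := if PySem.Str.endswith import_name ".*" then PySem.Str.slice import_name none (some (-2)) else import_name
    match d.get? normalized with
    | some v => [v]
    | none =>
      if PySem.Str.endswith import_name ".*" then
        PySem.List.sorted ((d.items.filter (fun p => PySem.Str.startswith p.1 (normalized ++ "."))).map (fun p => p.2)) (fun x => x) false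
      else
        -- normalized.split(".") : sep is the nonempty literal ".", so split? is always `some`
        let parts := match PySem.Str.split? normalized "." with | some l => l | none => []
        pvALoop d.items parts (PySem.List.pyRange (PySem.List.len parts - 1) 0 (-1))

-- ===== PORT B =====
-- level(dotted_name): largest i in 1..len(parts)-1 with dotted_name.startswith(".".join(parts[:i]) + ".")
def pvLevel (parts : List String) (name : String) : Int :=
  (PySem.List.pyRange 1 (PySem.List.len parts)).foldl
    (fun best i =>
      if PySem.Str.startswith name (PySem.Str.join "." (PySem.List.slice parts none (some i)) ++ ".") then i else best) 0

def resolve_dotted_internal_import_py_alt (import_name : String) (name_to_id : List (String × String)) : List String :=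
  let d := PySem.Dict.ofList name_to_id
  if import_name = "" then []
  else
    let normalized := if PySem.Str.endswith import_name ".*" then PySem.Str.slice import_name none (some (-2)) else import_name
    match d.get? normalized with
    | some v => [v]
    | none =>
      if PySem.Str.endswith import_name ".*" then
        PySem.List.sorted ((d.items.filter (fun p => PySem.Str.startswith p.1 (normalized ++ "."))).map (fun p => p.2)) (fun x => x) false
      else
        let parts := match PySem.Str.split? normalized "." with | some l => l | none => []
        let scored := d.items.map (fun p => (p.2, pvLevel parts p.1))
        let best : Int := scored.foldl (fun b q => max b q.2) 0
        if 1 ≤ best then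
          PySem.List.sorted ((scored.filter (fun q => q.2 == best)).map (fun q => q.1)) (fun x => x) false
        else []

-- ===== PRECONDITION & SPEC =====
def Spec_resolve_dotted_internal_import_py (import_name : String) (name_to_id : List (String × String)) (out : List String) : Prop := out = resolve_dotted_internal_import_py_alt import_name name_to_id
instance (import_name : String) (name_to_id : List (String × String)) (out : List String) : Decidable (Spec_resolve_dotted_internal_import_py import_name name_to_id out) := by unfold Spec_resolve_dotted_internal_import_py; infer_instance

-- ===== CLAIM (what is proved, stated in full; the proofs are below) =====
def Claim_equal_resolve_dotted_internal_import_py : Prop := ∀ (import_name : String) (name_to_id : List (String × String)), Dom_resolve_dotted_internal_import_py import_name name_to_id → Spec_resolve_dotted_internal_import_py import_name name_to_id (resolve_dotted_internal_import_py import_name name_to_id)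

-- ===== LEMMAS AND PROOFS =====

-- the dotted prefix of length i, as both ports build it
def pvPref (parts : List String) (i : Int) : String :=
  PySem.Str.join "." (PySem.List.slice parts none (some i)) ++ "."

-- generic characterisation of a 'record the last satisfied index' fold over range(1, m+1)
theorem pvLevelFold_spec (f : Int → Bool) (m : Nat) :
    ((List.range m).foldl (fun (best : Int) (k : Nat) => if f (1 + (k : Int)) then 1 + (k : Int) else best) (0 : Int) = 0 ∨
      (1 ≤ (List.range m).foldl (fun (best : Int) (k : Nat) => if f (1 + (k : Int)) then 1 + (k : Int) else best) (0 : Int) ∧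
       (List.range m).foldl (fun (best : Int) (k : Nat) => if f (1 + (k : Int)) then 1 + (k : Int) else best) (0 : Int) ≤ (m : Int) ∧
       f ((List.range m).foldl (fun (best : Int) (k : Nat) => if f (1 + (k : Int)) then 1 + (k : Int) else best) (0 : Int)) = true)) ∧
    (∀ i : Int, 1 ≤ i → i ≤ (m : Int) → f i = true →
      i ≤ (List.range m).foldl (fun (best : Int) (k : Nat) => if f (1 + (k : Int)) then 1 + (k : Int) else best) (0 : Int)) := by
  induction m with
  | zero => simp; intro i h1 h2; omega
  | succ m ih =>
    obtain ⟨ih1, ih2⟩ := ih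
    rw [List.range_succ, List.foldl_append]
    simp only [List.foldl_cons, List.foldl_nil]
    by_cases hf : f (1 + (m : Int)) = true
    · rw [if_pos hf]
      constructor
      · right
        refine ⟨by omega, by push_cast; omega, hf⟩
      · intro i h1 h2 _; push_cast at h2; omega
    · rw [if_neg hf]
      constructor
      · rcases ih1 with h | ⟨ha, hb, hc⟩
        · exact Or.inl h
        · exact Or.inr ⟨ha, by push_cast; omega, hc⟩
      · intro i h1 h2 hfi
        rcases (by push_cast at h2 ⊢; omega : i ≤ (m : Int) ∨ i = 1 + (m : Int)) with h | h
        · exact ih2 i h1 h hfi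
        · rw [h] at hfi; exact absurd hfi hf

-- characterisation of B's level fold
theorem pvLevel_spec (parts : List String) (name : String) :
    (pvLevel parts name = 0 ∨
      (1 ≤ pvLevel parts name ∧ pvLevel parts name < PySem.List.len parts ∧
        PySem.Str.startswith name (pvPref parts (pvLevel parts name)) = true)) ∧
    (∀ i : Int, 1 ≤ i → i < PySem.List.len parts →
      PySem.Str.startswith name (pvPref parts i) = true → i ≤ pvLevel parts name) := by
  have hrw : pvLevel parts name =
      (List.range (PySem.List.len parts - 1).toNat).foldl
        (fun (best : Int) (k : Nat) => if PySem.Str.startswith name (pvPref parts (1 + (k : Int))) = true then 1 + (k : Int) else best) (0 : Int) := by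
    unfold pvLevel
    rw [PySem.List.pyRange_one, List.foldl_map]
    rfl
  obtain ⟨h1, h2⟩ := pvLevelFold_spec (fun i => PySem.Str.startswith name (pvPref parts i)) (PySem.List.len parts - 1).toNat
  rw [hrw]
  simp only [PySem.List.len_eq] at h1 h2 ⊢
  constructor
  · rcases h1 with h | ⟨ha, hb, hc⟩
    · exact Or.inl h
    · exact Or.inr ⟨ha, by omega, hc⟩
  · intro i hi1 hi2 hpred
    exact h2 i hi1 (by omega) hpred

-- max fold characterisation
theorem pvFoldMax_spec (xs : List Int) (init : Int) :
    init ≤ xs.foldl max init ∧ (xs.foldl max init = init ∨ xs.foldl max init ∈ xs) ∧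
      ∀ x ∈ xs, x ≤ xs.foldl max init := by
  induction xs generalizing init with
  | nil => simp
  | cons x xt ih =>
    obtain ⟨h1, h2, h3⟩ := ih (max init x)
    refine ⟨le_trans (le_max_left _ _) h1, ?_, ?_⟩
    · rcases h2 with h | h
      · simp only [List.foldl_cons, h]
        rcases max_choice init x with hm | hm <;> simp [hm]
      · simp only [List.foldl_cons]; simp [h]
    · intro y hy
      rcases List.mem_cons.mp hy with rfl | hy
      · exact le_trans (le_max_right _ _) h1
      · exact h3 y hy

theorem pvALoop_cons (items : List (String × String)) (parts : List String) (i : Int) (rest : List Int) :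
    pvALoop items parts (i :: rest) =
      if ((items.filter (fun p => PySem.Str.startswith p.1 (pvPref parts i))).map (fun p => p.2)) = []
      then pvALoop items parts rest
      else PySem.List.sorted ((items.filter (fun p => PySem.Str.startswith p.1 (pvPref parts i))).map (fun p => p.2)) (fun x => x) false := rfl

-- A's descending scan, run from level j with `best` the maximum level of any entry
theorem pvALoop_spec (items : List (String × String)) (parts : List String) (best : Int)
    (hub : ∀ p ∈ items, pvLevel parts p.1 ≤ best)
    (hex : 1 ≤ best → ∃ p ∈ items, pvLevel parts p.1 = best) :
    ∀ j : Nat, (j : Int) ≤ PySem.List.len parts - 1 → best ≤ (j : Int) →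
      pvALoop items parts (PySem.List.pyRange (j : Int) 0 (-1)) =
        if 1 ≤ best then
          PySem.List.sorted ((items.filter (fun p => PySem.Str.startswith p.1 (pvPref parts best))).map (fun p => p.2)) (fun x => x) false
        else [] := by
  intro j
  induction j with
  | zero =>
    intro _ hb
    rw [PySem.List.pyRange_neg_one_eq_nil (by omega), if_neg (by simp at hb ⊢; omega)]
    rfl
  | succ j ih =>
    intro hle hble
    have hj1 : (0 : Int) < ((j + 1 : Nat) : Int) := by push_cast; omega
    have hjlt : ((j + 1 : Nat) : Int) < PySem.List.len parts := by omega
    rw [PySem.List.pyRange_neg_one_cons hj1, pvALoop_cons]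
    by_cases hms : ((items.filter (fun p => PySem.Str.startswith p.1 (pvPref parts ((j + 1 : Nat) : Int)))).map (fun p => p.2)) = []
    · rw [if_pos hms]
      have hnone : ∀ p ∈ items, ¬ (PySem.Str.startswith p.1 (pvPref parts ((j + 1 : Nat) : Int)) = true) := by
        simpa [List.map_eq_nil_iff, List.filter_eq_nil_iff] using hms
      have hbj : best ≤ (j : Int) := by
        by_contra hc
        have hbeq : best = ((j + 1 : Nat) : Int) := by push_cast at hble hc ⊢; omega
        obtain ⟨p, hp, hLp⟩ := hex (by omega)
        rcases (pvLevel_spec parts p.1).1 with h0 | ⟨_, _, hpred⟩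
        · omega
        · rw [hLp, hbeq] at hpred
          exact hnone p hp hpred
      have : ((j + 1 : Nat) : Int) - 1 = (j : Int) := by push_cast; ring
      rw [this]
      exact ih (by omega) hbj
    · rw [if_neg hms]
      obtain ⟨p, hp, hpred⟩ : ∃ p ∈ items, PySem.Str.startswith p.1 (pvPref parts ((j + 1 : Nat) : Int)) = true := by
        have hfil : items.filter (fun p => PySem.Str.startswith p.1 (pvPref parts ((j + 1 : Nat) : Int))) ≠ [] := by
          intro h; exact hms (by rw [h]; rfl)
        obtain ⟨p, hpmem⟩ := List.exists_mem_of_ne_nil _ hfil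
        exact ⟨p, (List.mem_filter.mp hpmem).1, (List.mem_filter.mp hpmem).2⟩
      have hge : ((j + 1 : Nat) : Int) ≤ pvLevel parts p.1 :=
        (pvLevel_spec parts p.1).2 _ (by push_cast; omega) hjlt hpred
      have hbeq : best = ((j + 1 : Nat) : Int) := le_antisymm hble (le_trans hge (hub p hp))
      rw [if_pos (by omega), hbeq]

-- the whole prefix-search stage: A's descending scan equals B's scoring pass
theorem pvStage_eq (items : List (String × String)) (parts : List String) :
    pvALoop items parts (PySem.List.pyRange (PySem.List.len parts - 1) 0 (-1)) =
      (let scored := items.map (fun p => (p.2, pvLevel parts p.1))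
       let best : Int := scored.foldl (fun b q => max b q.2) 0
       if 1 ≤ best then
         PySem.List.sorted ((scored.filter (fun q => q.2 == best)).map (fun q => q.1)) (fun x => x) false
       else []) := by
  simp only []
  have hfold : (items.map (fun p => (p.2, pvLevel parts p.1))).foldl (fun b q => max b q.2) 0 =
      (items.map (fun p => pvLevel parts p.1)).foldl max 0 := by
    rw [List.foldl_map, List.foldl_map]
  set best := (items.map (fun p => (p.2, pvLevel parts p.1))).foldl (fun b q => max b q.2) 0 with hbestdef
  obtain ⟨hnn, hmem, hub'⟩ := pvFoldMax_spec (items.map (fun p => pvLevel parts p.1)) 0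
  rw [← hfold] at hnn hmem hub'
  have hub : ∀ p ∈ items, pvLevel parts p.1 ≤ best := fun p hp =>
    hub' _ (List.mem_map.mpr ⟨p, hp, rfl⟩)
  have hex : 1 ≤ best → ∃ p ∈ items, pvLevel parts p.1 = best := by
    intro h1
    rcases hmem with h | h
    · omega
    · obtain ⟨p, hp, hLp⟩ := List.mem_map.mp h
      exact ⟨p, hp, hLp⟩
  have hble : best ≤ PySem.List.len parts - 1 ∧ 0 ≤ PySem.List.len parts - 1 ∨ best = 0 := by
    rcases hmem with h | h
    · right; exact h
    · obtain ⟨p, hp, hLp⟩ := List.mem_map.mp h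
      rcases (pvLevel_spec parts p.1).1 with h0 | ⟨ha, hb, _⟩
      · right; omega
      · left; omega
  -- the two result containers coincide once `best` is fixed
  have hsets : 1 ≤ best →
      ((items.map (fun p => (p.2, pvLevel parts p.1))).filter (fun q => q.2 == best)).map (fun q => q.1) =
      (items.filter (fun p => PySem.Str.startswith p.1 (pvPref parts best))).map (fun p => p.2) := by
    intro h1
    have hblt : best < PySem.List.len parts := by
      obtain ⟨p, hp, hLp⟩ := hex h1
      rcases (pvLevel_spec parts p.1).1 with h0 | ⟨_, hb, _⟩ <;> omega
    rw [List.filter_map, List.map_map]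
    have hcong : items.filter ((fun (q : String × Int) => q.2 == best) ∘ (fun p => (p.2, pvLevel parts p.1))) =
        items.filter (fun p => PySem.Str.startswith p.1 (pvPref parts best)) := by
      apply List.filter_congr
      intro p hp
      simp only [Function.comp]
      by_cases hpred : PySem.Str.startswith p.1 (pvPref parts best) = true
      · rw [hpred, beq_iff_eq]
        exact le_antisymm (hub p hp) ((pvLevel_spec parts p.1).2 best h1 hblt hpred)
      · rw [Bool.not_eq_true] at hpred
        rw [hpred, beq_eq_false_iff_ne]
        intro hLp
        rcases (pvLevel_spec parts p.1).1 with h0 | ⟨_, _, hpr⟩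
        · omega
        · rw [hLp] at hpr; rw [hpr] at hpred; exact absurd hpred (by simp)
    rw [hcong]
    rfl
  rcases hble with ⟨hb1, hb2⟩ | hb0
  · have hj : (((PySem.List.len parts - 1).toNat : Nat) : Int) = PySem.List.len parts - 1 := by
      simp only [PySem.List.len_eq] at hb2 ⊢; omega
    have := pvALoop_spec items parts best hub hex (PySem.List.len parts - 1).toNat (by omega) (by omega)
    rw [hj] at this
    rw [this]
    by_cases h1 : 1 ≤ best
    · rw [if_pos h1, if_pos h1, hsets h1]
    · rw [if_neg h1, if_neg h1]
  · have hnil : PySem.List.pyRange (PySem.List.len parts - 1) 0 (-1) = [] ∨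
        (0 : Int) ≤ PySem.List.len parts - 1 := by
      by_cases h : (0 : Int) ≤ PySem.List.len parts - 1
      · right; exact h
      · left; exact PySem.List.pyRange_neg_one_eq_nil (by omega)
    rcases hnil with h | h
    · rw [h]
      rw [if_neg (by omega)]
      rfl
    · have hj : (((PySem.List.len parts - 1).toNat : Nat) : Int) = PySem.List.len parts - 1 := by
        simp only [PySem.List.len_eq] at h ⊢; omega
      have := pvALoop_spec items parts best hub hex (PySem.List.len parts - 1).toNat (by omega) (by omega)
      rw [hj] at this
      rw [this]
      rw [if_neg (by omega), if_neg (by omega)]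

-- ===== VERDICT (by name: the statement is the Claim_ definition above) =====
theorem resolve_dotted_internal_import_py_spec : Claim_equal_resolve_dotted_internal_import_py := by
  intro import_name name_to_id _
  unfold Spec_resolve_dotted_internal_import_py
  unfold resolve_dotted_internal_import_py resolve_dotted_internal_import_py_alt
  simp only []
  split
  · rfl
  · split
    · rfl
    · split
      · rfl
      · exact pvStage_eq _ _
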